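-- pv_equiv track=rewrite | github.com/janschachtschabel/skohub-ttl-cleaner | ttl_cleaner.py | _parse_multiline_properties
-- ===== SOURCE A (Python) =====
-- from typing import Dict, List, Set, Tuple, Optional
--
-- def _parse_multiline_properties(block: str) -> List[str]:
--     """Parse multi-line SKOS properties correctly, preserving complete lists."""
--     properties = []
--     lines = block.split('\n')
--
--     # Skip text fields that are already processed
--     skip_patterns = [
--         'skos:prefLabel', 'skos:altLabel', 'skos:definition', 'skos:note',
--         'skos:scopeNote', 'skos:editorialNote', 'skos:historyNote',
--         'skos:changeNote', 'skos:example'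
--     ]
--
--     i = 0
--     while i < len(lines):
--         line = lines[i].strip()
--
--         # Skip empty lines, comments, URI declaration, and end marker
--         if (not line or line.startswith('#') or
--             line.endswith('a skos:Concept ;') or line == '.' or
--             line.startswith('http://') or line.startswith('<')):
--             i += 1
--             continue
--
--         # Skip already processed text fields
--         if any(pattern in line for pattern in skip_patterns):
--             i += 1
--             continue
--
--         # Check if this line starts a property (retain all non-text properties like skos:notation, dct:source, etc.)
--         if ':' in line:
--             # Start collecting the complete property (may span multiple lines)
--             property_lines = []
--             current_line = line
--
--             # Continue collecting until we find the end of this property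
--             while i < len(lines):
--                 current_line = lines[i].strip()
--                 if not current_line:
--                     i += 1
--                     continue
--
--                 property_lines.append(current_line)
--
--                 # Check if this line ends the property (ends with ; or .)
--                 if current_line.endswith(';') or current_line.endswith('.'):
--                     break
--
--                 i += 1
--
--             # Join the property lines and clean up
--             if property_lines:
--                 complete_property = ' '.join(property_lines)
--                 # Remove trailing punctuation for consistent formatting
--                 complete_property = complete_property.rstrip(' ;.,').strip()
--                 if complete_property and ':' in complete_property:
--                     properties.append(complete_property)
--
--         i += 1
--
--     return properties
-- ===== SOURCE B (Python) =====
-- from typing import List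
--
-- _SKIP_PATTERNS = [
--     'skos:prefLabel', 'skos:altLabel', 'skos:definition', 'skos:note',
--     'skos:scopeNote', 'skos:editorialNote', 'skos:historyNote',
--     'skos:changeNote', 'skos:example'
-- ]
--
--
-- def _scan_groups(lines):
--     """Single pass with an explicit buffer: returns the list of property-line groups."""
--     groups = []
--     buf = None  # None = not inside a property
--     for raw in lines:
--         line = raw.strip()
--         if buf is None:
--             # skip rules apply only when looking for a property start
--             if (not line or line.startswith('#') or
--                     line.endswith('a skos:Concept ;') or line == '.' or
--                     line.startswith('http://') or line.startswith('<')):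
--                 continue
--             if any(pattern in line for pattern in _SKIP_PATTERNS):
--                 continue
--             if ':' not in line:
--                 continue
--             buf = []
--         if not line:
--             continue  # blank continuation lines are skipped
--         buf.append(line)
--         if line.endswith(';') or line.endswith('.'):
--             groups.append(buf)
--             buf = None
--     if buf:
--         groups.append(buf)  # flush an unterminated property at EOF
--     return groups
--
--
-- def _parse_multiline_properties(block: str) -> List[str]:
--     out = []
--     for group in _scan_groups(block.split('\n')):
--         prop = ' '.join(group).rstrip(' ;.,').strip()
--         if prop and ':' in prop:
--             out.append(prop)
--     return out
-- ===== Notes on version B (the rewrite author's own statement) =====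
-- stated objective: simpler
-- what changed: A's nested index-advancing while-loops are replaced by a two-pass decomposition: one flag-state scan over the lines that collects property-line groups, then a separate map/filter pass that formats each group.
import Mathlib
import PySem

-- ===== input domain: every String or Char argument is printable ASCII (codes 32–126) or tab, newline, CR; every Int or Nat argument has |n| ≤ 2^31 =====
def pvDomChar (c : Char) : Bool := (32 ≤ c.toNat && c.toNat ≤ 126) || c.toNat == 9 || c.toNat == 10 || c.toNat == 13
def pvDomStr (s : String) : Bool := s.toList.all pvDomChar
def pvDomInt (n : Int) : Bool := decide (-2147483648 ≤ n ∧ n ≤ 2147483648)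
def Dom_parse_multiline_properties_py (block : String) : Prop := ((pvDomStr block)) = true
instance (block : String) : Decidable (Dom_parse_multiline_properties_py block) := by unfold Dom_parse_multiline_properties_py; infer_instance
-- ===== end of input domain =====

-- B replaces A's nested index-advancing while-loops by a two-pass decomposition (a single
-- flag-state fold that collects property-line groups, then a map/filter formatting pass);
-- objective: simpler structure, same cost.

-- ===== shared primitive helpers (identical literals / stdlib calls in both Pythons) =====

-- the skip_patterns list, identical in both sources
def pvSkipPatterns : List String :=
  ["skos:prefLabel", "skos:altLabel", "skos:definition", "skos:note",
   "skos:scopeNote", "skos:editorialNote", "skos:historyNote",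
   "skos:changeNote", "skos:example"]

-- hand port of Python's s.rstrip(' ;.,') (PySem has no directional rstrip-with-chars):
-- drop from the right every char in the set; exact for any input
def pvRstripPunct (s : String) : String :=
  String.ofList ((s.toList.reverse.dropWhile (fun c => c = ' ' || c = ';' || c = '.' || c = ',')).reverse)

-- the start-line skip condition (first 'if' of A's outer loop / of B's scanner)
def pvStartSkip (line : String) : Bool :=
  line == "" || PySem.Str.startswith line "#" ||
  PySem.Str.endswith line "a skos:Concept ;" || line == "." ||
  PySem.Str.startswith line "http://" || PySem.Str.startswith line "<"

-- any(pattern in line for pattern in skip_patterns)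
def pvPatHit (line : String) : Bool :=
  pvSkipPatterns.any (fun p => PySem.Str.isIn p line)

-- ' '.join(group).rstrip(' ;.,').strip()
def pvClean (g : List String) : String :=
  PySem.Str.strip (pvRstripPunct (PySem.Str.join " " g))

-- block.split('\n')  (the separator is a non-empty literal, so split? is always some)
def pvLines (block : String) : List String :=
  (PySem.Str.split? block "\n").getD []

-- ===== PORT A =====

-- inner while-loop: re-strips lines[i] from the start line on, skips blanks, appends,
-- breaks on ';'/'.'-terminated lines; returns (property_lines, lines after the break)
def pvAInner : List String → List String → List String × List String
  | [], acc => (acc, [])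
  | l :: rest, acc =>
    let cur := PySem.Str.strip l
    if cur == "" then pvAInner rest acc
    else
      let acc' := acc ++ [cur]
      if PySem.Str.endswith cur ";" || PySem.Str.endswith cur "." then (acc', rest)
      else pvAInner rest acc'

-- termination measure for the outer loop: the inner loop consumes at least the start line
theorem pvAInner_len : ∀ (xs acc : List String), ((pvAInner xs acc).2).length ≤ xs.length - 1
  | [], acc => by simp [pvAInner]
  | l :: rest, acc => by
    simp only [pvAInner]
    split
    · exact le_trans (pvAInner_len rest acc) (by simp)
    · split
      · simp
      · exact le_trans (pvAInner_len rest _) (by simp)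

-- outer while-loop of A, recursion over the remaining lines, props accumulated in order
def pvAOuter : List String → List String → List String
  | [], props => props
  | l :: rest, props =>
    let line := PySem.Str.strip l
    if pvStartSkip line then pvAOuter rest props
    else if pvPatHit line then pvAOuter rest props
    else if PySem.Str.isIn ":" line then
      let r := pvAInner (l :: rest) []
      let props' :=
        if r.1 = [] then props
        else
          let cp := pvClean r.1
          if !(cp == "") && PySem.Str.isIn ":" cp then props ++ [cp] else props
      pvAOuter r.2 props'
    else pvAOuter rest props
  termination_by xs => xs.length
  decreasing_by
  · simp
  · simp
  · have := pvAInner_len (l :: rest) []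
    simp at this ⊢
    omega
  · simp

def parse_multiline_properties_py (block : String) : List String :=
  pvAOuter (pvLines block) []

-- ===== PORT B =====

-- one step of B's scanner: state = (current buffer or none, groups collected so far)
def pvBStep (st : Option (List String) × List (List String)) (raw : String) :
    Option (List String) × List (List String) :=
  let line := PySem.Str.strip raw
  let buf? : Option (List String) :=
    match st.1 with
    | some b => some b
    | none =>
      if pvStartSkip line then none
      else if pvPatHit line then none
      else if !(PySem.Str.isIn ":" line) then none
      else some []
  match buf? with
  | none => (none, st.2)
  | some buf =>
    if line == "" then (some buf, st.2)
    else
      let buf' := buf ++ [line]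
      if PySem.Str.endswith line ";" || PySem.Str.endswith line "." then (none, st.2 ++ [buf'])
      else (some buf', st.2)

def parse_multiline_properties_py_alt (block : String) : List String :=
  let st := (pvLines block).foldl pvBStep (none, [])
  let groups : List (List String) :=
    match st.1 with
    | some b => if b.isEmpty then st.2 else st.2 ++ [b]   -- 'if buf: groups.append(buf)'
    | none => st.2
  (groups.map pvClean).filter (fun s => !(s == "") && PySem.Str.isIn ":" s)

-- ===== PRECONDITION & SPEC =====
def Spec_parse_multiline_properties_py (block : String) (out : List String) : Prop := out = parse_multiline_properties_py_alt block
instance (block : String) (out : List String) : Decidable (Spec_parse_multiline_properties_py block out) := by unfold Spec_parse_multiline_properties_py; infer_instance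

-- ===== CLAIM (what is proved, stated in full; the proofs are below) =====
def Claim_equal_parse_multiline_properties_py : Prop := ∀ (block : String), Dom_parse_multiline_properties_py block → Spec_parse_multiline_properties_py block (parse_multiline_properties_py block)

-- ===== LEMMAS AND PROOFS =====

-- B's end-of-input flush
def pvFinish (st : Option (List String) × List (List String)) : List (List String) :=
  match st.1 with
  | some b => if b.isEmpty then st.2 else st.2 ++ [b]
  | none => st.2

-- B's formatting pass
def pvPost (gs : List (List String)) : List String :=
  (gs.map pvClean).filter (fun s => !(s == "") && PySem.Str.isIn ":" s)

-- ---- step equations for pvBStep ----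

theorem pvBStep_some_blank (b : List String) (gs : List (List String)) (raw : String)
    (h : PySem.Str.strip raw = "") : pvBStep (some b, gs) raw = (some b, gs) := by
  simp [pvBStep, h]

theorem pvBStep_some_end (b : List String) (gs : List (List String)) (raw : String)
    (h : PySem.Str.strip raw ≠ "")
    (he : (PySem.Str.endswith (PySem.Str.strip raw) ";" || PySem.Str.endswith (PySem.Str.strip raw) ".") = true) :
    pvBStep (some b, gs) raw = (none, gs ++ [b ++ [PySem.Str.strip raw]]) := by
  unfold pvBStep
  simp only [Bool.or_eq_true] at he
  simp_all

theorem pvBStep_some_mid (b : List String) (gs : List (List String)) (raw : String)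
    (h : PySem.Str.strip raw ≠ "")
    (he : (PySem.Str.endswith (PySem.Str.strip raw) ";" || PySem.Str.endswith (PySem.Str.strip raw) ".") = false) :
    pvBStep (some b, gs) raw = (some (b ++ [PySem.Str.strip raw]), gs) := by
  unfold pvBStep
  simp only [Bool.or_eq_false_iff] at he
  simp_all

theorem pvBStep_none_skip (gs : List (List String)) (raw : String)
    (h : pvStartSkip (PySem.Str.strip raw) = true ∨ pvPatHit (PySem.Str.strip raw) = true ∨
         PySem.Str.isIn ":" (PySem.Str.strip raw) = false) :
    pvBStep (none, gs) raw = (none, gs) := by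
  unfold pvBStep
  rcases h with h | h | h
  · simp [h]
  · by_cases hs : pvStartSkip (PySem.Str.strip raw) = true <;> simp_all
  · by_cases hs : pvStartSkip (PySem.Str.strip raw) = true
    · simp [hs]
    · by_cases hp : pvPatHit (PySem.Str.strip raw) = true <;> simp_all

theorem pvBStep_none_start_end (gs : List (List String)) (raw : String)
    (hs : pvStartSkip (PySem.Str.strip raw) = false) (hp : pvPatHit (PySem.Str.strip raw) = false)
    (hc : PySem.Str.isIn ":" (PySem.Str.strip raw) = true)
    (he : (PySem.Str.endswith (PySem.Str.strip raw) ";" || PySem.Str.endswith (PySem.Str.strip raw) ".") = true) :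
    pvBStep (none, gs) raw = (none, gs ++ [[PySem.Str.strip raw]]) := by
  have hne : ¬ (PySem.Str.strip raw = "") := by
    intro h; simp [pvStartSkip, h] at hs
  unfold pvBStep
  simp only [Bool.or_eq_true] at he
  simp_all

theorem pvBStep_none_start_mid (gs : List (List String)) (raw : String)
    (hs : pvStartSkip (PySem.Str.strip raw) = false) (hp : pvPatHit (PySem.Str.strip raw) = false)
    (hc : PySem.Str.isIn ":" (PySem.Str.strip raw) = true)
    (he : (PySem.Str.endswith (PySem.Str.strip raw) ";" || PySem.Str.endswith (PySem.Str.strip raw) ".") = false) :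
    pvBStep (none, gs) raw = (some [PySem.Str.strip raw], gs) := by
  have hne : ¬ (PySem.Str.strip raw = "") := by
    intro h; simp [pvStartSkip, h] at hs
  unfold pvBStep
  simp only [Bool.or_eq_false_iff] at he
  simp_all

-- ---- step equations for pvAInner ----

theorem pvAInner_blank (l : String) (rest acc : List String) (h : PySem.Str.strip l = "") :
    pvAInner (l :: rest) acc = pvAInner rest acc := by
  simp [pvAInner, h]

theorem pvAInner_end (l : String) (rest acc : List String) (h : PySem.Str.strip l ≠ "")
    (he : (PySem.Str.endswith (PySem.Str.strip l) ";" || PySem.Str.endswith (PySem.Str.strip l) ".") = true) :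
    pvAInner (l :: rest) acc = (acc ++ [PySem.Str.strip l], rest) := by
  rw [pvAInner]
  rw [if_neg (by simp [h]), if_pos he]

theorem pvAInner_mid (l : String) (rest acc : List String) (h : PySem.Str.strip l ≠ "")
    (he : (PySem.Str.endswith (PySem.Str.strip l) ";" || PySem.Str.endswith (PySem.Str.strip l) ".") = false) :
    pvAInner (l :: rest) acc = pvAInner rest (acc ++ [PySem.Str.strip l]) := by
  rw [pvAInner]
  rw [if_neg (by simp [h]), if_neg (by simpa using he)]

-- ---- step equations for pvAOuter ----

theorem pvAOuter_skip (l : String) (rest props : List String)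
    (h : pvStartSkip (PySem.Str.strip l) = true ∨ pvPatHit (PySem.Str.strip l) = true ∨
         PySem.Str.isIn ":" (PySem.Str.strip l) = false) :
    pvAOuter (l :: rest) props = pvAOuter rest props := by
  rw [pvAOuter]
  rcases h with h | h | h
  · rw [if_pos h]
  · by_cases hs : pvStartSkip (PySem.Str.strip l) = true
    · rw [if_pos hs]
    · rw [if_neg hs, if_pos h]
  · by_cases hs : pvStartSkip (PySem.Str.strip l) = true
    · rw [if_pos hs]
    · by_cases hp : pvPatHit (PySem.Str.strip l) = true
      · rw [if_neg hs, if_pos hp]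
      · rw [if_neg hs, if_neg hp, if_neg (by simpa using h)]

theorem pvAOuter_collect (l : String) (rest props : List String)
    (hs : pvStartSkip (PySem.Str.strip l) = false) (hp : pvPatHit (PySem.Str.strip l) = false)
    (hc : PySem.Str.isIn ":" (PySem.Str.strip l) = true) :
    pvAOuter (l :: rest) props =
      pvAOuter (pvAInner (l :: rest) []).2
        (if (pvAInner (l :: rest) []).1 = [] then props
         else if !(pvClean (pvAInner (l :: rest) []).1 == "") &&
                   PySem.Str.isIn ":" (pvClean (pvAInner (l :: rest) []).1)
              then props ++ [pvClean (pvAInner (l :: rest) []).1] else props) := by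
  rw [pvAOuter]
  rw [if_neg (by simp [hs]), if_neg (by simp [hp]), if_pos hc]

-- ---- the formatting pass distributes over appending one group ----

theorem pvPost_append' (gs : List (List String)) (g : List String) (hg : g ≠ []) :
    (if g = [] then pvPost gs
     else if !(pvClean g == "") && PySem.Str.isIn ":" (pvClean g)
          then pvPost gs ++ [pvClean g] else pvPost gs)
    = pvPost (gs ++ [g]) := by
  rw [if_neg hg]
  simp only [pvPost, List.map_append, List.filter_append, List.map_cons, List.map_nil]
  by_cases hk1 : pvClean g = "" <;> by_cases hk2 : PySem.Str.isIn ":" (pvClean g) = true <;>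
    simp_all

theorem pvAInner_fst_ne_nil : ∀ (xs acc : List String), acc ≠ [] → (pvAInner xs acc).1 ≠ []
  | [], acc, h => h
  | l :: rest, acc, h => by
    simp only [pvAInner]
    split
    · exact pvAInner_fst_ne_nil rest acc h
    · split
      · simp
      · exact pvAInner_fst_ne_nil rest _ (by simp)

-- the inner while-loop of A matches B's fold while the buffer is open
theorem pvInner_fold : ∀ (xs acc : List String) (gs : List (List String)), acc ≠ [] →
    pvFinish (xs.foldl pvBStep (some acc, gs)) =
      pvFinish ((pvAInner xs acc).2.foldl pvBStep (none, gs ++ [(pvAInner xs acc).1]))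
  | [], acc, gs, h => by
    simp [pvAInner, pvFinish, List.isEmpty_iff, h]
  | l :: rest, acc, gs, h => by
    rw [List.foldl_cons]
    by_cases hcur : PySem.Str.strip l = ""
    · rw [pvBStep_some_blank _ _ _ hcur, pvAInner_blank _ _ _ hcur]
      exact pvInner_fold rest acc gs h
    · by_cases hend : (PySem.Str.endswith (PySem.Str.strip l) ";" ||
          PySem.Str.endswith (PySem.Str.strip l) ".") = true
      · rw [pvBStep_some_end _ _ _ hcur hend, pvAInner_end _ _ _ hcur hend]
      · rw [pvBStep_some_mid _ _ _ hcur (by simpa using hend),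
            pvAInner_mid _ _ _ hcur (by simpa using hend)]
        exact pvInner_fold rest (acc ++ [PySem.Str.strip l]) gs (by simp)

-- the outer while-loop of A matches B's fold from a closed buffer
theorem pvOuter_fold : ∀ (n : Nat) (xs : List String), xs.length ≤ n →
    ∀ (gs : List (List String)),
      pvAOuter xs (pvPost gs) = pvPost (pvFinish (xs.foldl pvBStep (none, gs) )) := by
  intro n
  induction n with
  | zero =>
    intro xs hx gs
    have : xs = [] := List.length_eq_zero_iff.mp (Nat.le_zero.mp hx)
    subst this
    simp [pvAOuter, pvFinish]
  | succ n ih =>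
    intro xs hx gs
    match xs with
    | [] => simp [pvAOuter, pvFinish]
    | l :: rest =>
      have hr : rest.length ≤ n := by simpa using Nat.lt_succ_iff.mp (by simpa using hx)
      rw [List.foldl_cons]
      by_cases hskip : pvStartSkip (PySem.Str.strip l) = true
      · rw [pvAOuter_skip _ _ _ (Or.inl hskip), pvBStep_none_skip _ _ (Or.inl hskip)]
        exact ih rest hr gs
      · by_cases hpat : pvPatHit (PySem.Str.strip l) = true
        · rw [pvAOuter_skip _ _ _ (Or.inr (Or.inl hpat)),
              pvBStep_none_skip _ _ (Or.inr (Or.inl hpat))]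
          exact ih rest hr gs
        · by_cases hcol : PySem.Str.isIn ":" (PySem.Str.strip l) = true
          · -- collecting branch
            have hskip' := Bool.eq_false_iff.mpr hskip
            have hpat' := Bool.eq_false_iff.mpr hpat
            have hne : PySem.Str.strip l ≠ "" := by
              intro h; simp [pvStartSkip, h] at hskip'
            rw [pvAOuter_collect _ _ _ hskip' hpat' hcol]
            by_cases hend : (PySem.Str.endswith (PySem.Str.strip l) ";" ||
                PySem.Str.endswith (PySem.Str.strip l) ".") = true
            · -- single-line property: group closes on the start line
              rw [pvBStep_none_start_end _ _ hskip' hpat' hcol hend,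
                  pvAInner_end _ _ _ hne hend]
              simp only [List.nil_append]
              rw [pvPost_append' gs [PySem.Str.strip l] (by simp)]
              exact ih rest hr (gs ++ [[PySem.Str.strip l]])
            · -- multi-line property
              have hend' := Bool.eq_false_iff.mpr hend
              rw [pvBStep_none_start_mid _ _ hskip' hpat' hcol hend',
                  pvAInner_mid _ _ _ hne hend']
              simp only [List.nil_append]
              have hrne : (pvAInner rest [PySem.Str.strip l]).1 ≠ [] :=
                pvAInner_fst_ne_nil rest _ (by simp)
              have hrlen : (pvAInner rest [PySem.Str.strip l]).2.length ≤ n := by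
                have := pvAInner_len rest [PySem.Str.strip l]
                omega
              rw [pvInner_fold rest [PySem.Str.strip l] gs (by simp)]
              rw [pvPost_append' gs (pvAInner rest [PySem.Str.strip l]).1 hrne]
              exact ih _ hrlen (gs ++ [(pvAInner rest [PySem.Str.strip l]).1])
          · rw [pvAOuter_skip _ _ _ (Or.inr (Or.inr (by simpa using hcol))),
                pvBStep_none_skip _ _ (Or.inr (Or.inr (by simpa using hcol)))]
            exact ih rest hr gs

-- ===== VERDICT (by name: the statement is the Claim_ definition above) =====
theorem parse_multiline_properties_py_spec : Claim_equal_parse_multiline_properties_py := by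
  intro block _
  unfold Spec_parse_multiline_properties_py
  show parse_multiline_properties_py block = parse_multiline_properties_py_alt block
  unfold parse_multiline_properties_py parse_multiline_properties_py_alt
  have := pvOuter_fold (pvLines block).length (pvLines block) le_rfl []
  simpa [pvPost, pvFinish] using this
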